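-- pv_equiv track=rewrite | github.com/4sgupta828/doky | core/meta_cognition.py | _count_consecutive_same_agent
-- ===== SOURCE A (Python) =====
-- from typing import Dict, Any, List, Optional, Set
--
-- def _count_consecutive_same_agent(agent_sequence: List[str]) -> int:
--     """Count consecutive calls to the same agent"""
--     if not agent_sequence:
--         return 0
--
--     current_agent = agent_sequence[-1]
--     count = 1
--
--     for i in range(len(agent_sequence) - 2, -1, -1):
--         if agent_sequence[i] == current_agent:
--             count += 1
--         else:
--             break
--
--     return count
-- ===== SOURCE B (Python) =====
-- from itertools import groupby
-- from typing import List
--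
-- def _count_consecutive_same_agent(agent_sequence: List[str]) -> int:
--     """Count consecutive calls to the same agent (length of the trailing run)."""
--     if not agent_sequence:
--         return 0
--     lengths = [sum(1 for _ in g) for _, g in groupby(agent_sequence)]
--     return lengths[-1]
-- ===== Notes on version B (the rewrite author's own statement) =====
-- stated objective: idiomatic
-- what changed: Replaces the backward index scan with early break by a single forward pass that groups the whole sequence into consecutive equal runs (itertools.groupby) and returns the last run's length.
import Mathlib
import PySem

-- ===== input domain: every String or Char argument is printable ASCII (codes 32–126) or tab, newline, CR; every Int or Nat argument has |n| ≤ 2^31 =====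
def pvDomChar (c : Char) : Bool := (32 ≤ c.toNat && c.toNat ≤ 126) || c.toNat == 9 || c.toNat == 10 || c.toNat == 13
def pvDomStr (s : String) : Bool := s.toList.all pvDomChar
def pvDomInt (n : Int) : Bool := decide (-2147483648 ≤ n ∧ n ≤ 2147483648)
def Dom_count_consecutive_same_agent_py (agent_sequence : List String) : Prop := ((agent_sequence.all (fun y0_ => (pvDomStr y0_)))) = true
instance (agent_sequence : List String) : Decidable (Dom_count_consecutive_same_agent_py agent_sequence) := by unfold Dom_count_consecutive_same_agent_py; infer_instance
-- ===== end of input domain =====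

-- B replaces A's backward scan with break by a forward pass grouping the sequence
-- into consecutive equal runs and returning the last run's length (idiomatic groupby).

-- ===== PORT A =====
-- the for-loop over range(len-2, -1, -1) with break, as recursion on the index i
def pvLoopA (xs : List String) (current : String) (i : Int) (count : Int) : Int :=
  if h : 0 ≤ i then
    if PySem.List.pyGet? xs i = some current then pvLoopA xs current (i - 1) (count + 1)
    else count
  else count
termination_by (i + 1).toNat
decreasing_by omega

def count_consecutive_same_agent_py (agent_sequence : List String) : Int :=
  if agent_sequence = [] then 0
  else
    let current := (PySem.List.pyGet? agent_sequence (-1)).getD ""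
    pvLoopA agent_sequence current ((agent_sequence.length : Int) - 2) 1

-- ===== PORT B =====
-- groupby's forward pass: fold keeping the runs (newest first); each step either
-- extends the current (head) run or opens a new one
def pvRuns (xs : List String) : List (String × Int) :=
  xs.foldl (fun acc a =>
    match acc with
    | [] => [(a, 1)]
    | (k, n) :: t => if k = a then (k, n + 1) :: t else (a, 1) :: (k, n) :: t) []

def count_consecutive_same_agent_py_alt (agent_sequence : List String) : Int :=
  if agent_sequence = [] then 0
  else
    match pvRuns agent_sequence with
    | [] => 0
    | (_, n) :: _ => n   -- lengths[-1]: the last run is the head of the accumulator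

-- ===== PRECONDITION & SPEC =====
def Spec_count_consecutive_same_agent_py (agent_sequence : List String) (out : Int) : Prop := out = count_consecutive_same_agent_py_alt agent_sequence
instance (agent_sequence : List String) (out : Int) : Decidable (Spec_count_consecutive_same_agent_py agent_sequence out) := by unfold Spec_count_consecutive_same_agent_py; infer_instance

-- ===== CLAIM (what is proved, stated in full; the proofs are below) =====
def Claim_equal_count_consecutive_same_agent_py : Prop := ∀ (agent_sequence : List String), Dom_count_consecutive_same_agent_py agent_sequence → Spec_count_consecutive_same_agent_py agent_sequence (count_consecutive_same_agent_py agent_sequence)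

-- ===== LEMMAS AND PROOFS =====

-- length of the run of c at the head of a list
def pvHeadRun (c : String) : List String → Int
  | [] => 0
  | a :: rest => if a = c then 1 + pvHeadRun c rest else 0

theorem pvLoopA_spec (ys rest : List String) (c : String) (count : Int) :
    pvLoopA (ys ++ rest) c ((ys.length : Int) - 1) count = count + pvHeadRun c ys.reverse := by
  induction ys using List.reverseRecOn generalizing rest count with
  | nil => simp [pvLoopA, pvHeadRun]
  | append_singleton zs b ih =>
    have hget : PySem.List.pyGet? ((zs ++ [b]) ++ rest) (zs.length : Int) = some b := by
      rw [List.append_assoc, List.singleton_append]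
      exact PySem.List.pyGet?_append_length zs rest b
    rw [pvLoopA]
    have h0 : (0:Int) ≤ ((zs ++ [b]).length : Int) - 1 := by simp
    rw [dif_pos h0]
    have hidx : ((zs ++ [b]).length : Int) - 1 = (zs.length : Int) := by
      simp
    rw [hidx, hget]
    by_cases hb : b = c
    · subst hb
      rw [if_pos rfl]
      have hih := ih ([b] ++ rest) (count + 1)
      rw [← List.append_assoc] at hih
      rw [hih]
      simp [pvHeadRun]
      ring
    · have hne : some b ≠ some c := by simpa using hb
      rw [if_neg hne]
      simp [pvHeadRun, hb]

theorem pvRuns_spec (ys : List String) (c : String) :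
    ∃ t, pvRuns (ys ++ [c]) = (c, 1 + pvHeadRun c ys.reverse) :: t := by
  induction ys using List.reverseRecOn generalizing c with
  | nil => exact ⟨[], by simp [pvRuns, pvHeadRun]⟩
  | append_singleton zs b ih =>
    obtain ⟨t, ht⟩ := ih b
    have hstep : pvRuns ((zs ++ [b]) ++ [c]) =
        (fun acc a =>
          match acc with
          | [] => [(a, 1)]
          | (k, n) :: t => if k = a then (k, n + 1) :: t else (a, 1) :: (k, n) :: t)
          (pvRuns (zs ++ [b])) c := by
      simp [pvRuns, List.foldl_append]
    rw [hstep, ht]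
    by_cases hb : b = c
    · subst hb
      refine ⟨t, ?_⟩
      simp [pvHeadRun]
      ring
    · refine ⟨(b, 1 + pvHeadRun b zs.reverse) :: t, ?_⟩
      simp [hb, pvHeadRun]

-- ===== VERDICT (by name: the statement is the Claim_ definition above) =====
theorem count_consecutive_same_agent_py_spec : Claim_equal_count_consecutive_same_agent_py := by
  intro xs _
  unfold Spec_count_consecutive_same_agent_py
  rcases eq_or_ne xs [] with h | h
  · subst h; rfl
  · obtain ⟨ys, c, rfl⟩ : ∃ ys c, xs = ys ++ [c] := by
      rcases xs.eq_nil_or_concat with h' | ⟨ys, c, hc⟩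
      · exact absurd h' h
      · exact ⟨ys, c, by simpa [List.concat_eq_append] using hc⟩
    unfold count_consecutive_same_agent_py count_consecutive_same_agent_py_alt
    simp only [if_neg h]
    obtain ⟨t, ht⟩ := pvRuns_spec ys c
    rw [ht]
    have hcur : (PySem.List.pyGet? (ys ++ [c]) (-1)).getD "" = c := by
      rw [PySem.List.pyGet?_neg_one_append_singleton]; rfl
    rw [hcur]
    have hlen : ((ys ++ [c]).length : Int) - 2 = (ys.length : Int) - 1 := by
      simp
      omega
    rw [hlen]
    have := pvLoopA_spec ys [c] c 1
    rw [this]
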